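-- pv_equiv track=rewrite | github.com/armor-2025/yow-lens-api | hybrid_search.py | extract_primary_color
-- ===== SOURCE A (Python) =====
-- def extract_primary_color(gemini_color: str) -> str:
--     if not gemini_color:
--         return 'gray'
--
--     gemini_lower = gemini_color.lower()
--     color_words = ['olive', 'navy', 'burgundy', 'maroon', 'charcoal', 'teal', 'indigo',
--                    'coral', 'gold', 'silver', 'khaki', 'beige', 'cream', 'tan',
--                    'black', 'white', 'gray', 'grey', 'blue', 'red', 'green',
--                    'brown', 'pink', 'purple', 'yellow', 'orange']
--
--     found_colors = []
--     for color in color_words: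
--         pos = gemini_lower.find(color)
--         if pos != -1:
--             found_colors.append((pos, color))
--
--     if found_colors:
--         found_colors.sort(key=lambda x: x[0])
--         return found_colors[0][1]
--
--     return 'gray'
-- ===== SOURCE B (Python) =====
-- COLOR_WORDS = ['olive', 'navy', 'burgundy', 'maroon', 'charcoal', 'teal', 'indigo',
--                'coral', 'gold', 'silver', 'khaki', 'beige', 'cream', 'tan',
--                'black', 'white', 'gray', 'grey', 'blue', 'red', 'green',
--                'brown', 'pink', 'purple', 'yellow', 'orange']
--
--
-- def extract_primary_color(gemini_color: str) -> str:
--     s = gemini_color.lower()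
--     for i in range(len(s)):
--         for color in COLOR_WORDS:
--             if s.startswith(color, i):
--                 return color
--     return 'gray'
-- ===== Notes on version B (the rewrite author's own statement) =====
-- stated objective: alternative
-- what changed: Replaced A's per-color find + collect-and-stably-sort pipeline by a single left-to-right scan over string positions that returns the first color word starting at the earliest position (no found-list, no sort).
import Mathlib
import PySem

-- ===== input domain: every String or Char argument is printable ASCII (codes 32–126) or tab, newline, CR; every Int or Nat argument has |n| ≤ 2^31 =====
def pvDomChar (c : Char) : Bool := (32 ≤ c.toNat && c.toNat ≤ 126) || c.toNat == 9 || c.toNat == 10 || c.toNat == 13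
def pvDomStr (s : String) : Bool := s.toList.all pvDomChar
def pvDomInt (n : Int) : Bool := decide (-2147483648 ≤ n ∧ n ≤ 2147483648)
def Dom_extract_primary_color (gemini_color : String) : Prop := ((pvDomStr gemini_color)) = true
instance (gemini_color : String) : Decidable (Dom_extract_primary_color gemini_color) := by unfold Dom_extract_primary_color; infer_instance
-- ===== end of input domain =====

-- B replaces A's per-color find + collect + sort by a single left-to-right scan over
-- positions that returns the first color word starting there (objective: alternative decomposition).

-- ===== PORT A =====
def pvColorWords : List String :=
  ["olive", "navy", "burgundy", "maroon", "charcoal", "teal", "indigo",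
   "coral", "gold", "silver", "khaki", "beige", "cream", "tan",
   "black", "white", "gray", "grey", "blue", "red", "green",
   "brown", "pink", "purple", "yellow", "orange"]

def extract_primary_color (gemini_color : String) : String :=
  if gemini_color = "" then "gray"
  else
    let gemini_lower := PySem.Str.lower gemini_color
    let found_colors := pvColorWords.foldl (fun acc color =>
      let pos := PySem.Str.find gemini_lower color
      if pos ≠ -1 then acc ++ [(pos, color)] else acc) ([] : List (Int × String))
    match PySem.List.sorted found_colors (fun x => x.1) false with
    | [] => "gray"
    | x :: _ => x.2

-- ===== PORT B =====
-- Source B's 's.startswith(color, i)' with 0 ≤ i < len(s) is ported exactly as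
-- 'color is a prefix of the i-th suffix of s'.
def extract_primary_color_alt (gemini_color : String) : String :=
  let s := PySem.Str.lower gemini_color
  match (List.range (PySem.Str.len s).toNat).findSome? (fun i =>
      pvColorWords.findSome? (fun color =>
        if PySem.Chars.startswith (s.toList.drop i) color.toList then some color else none)) with
  | some c => c
  | none => "gray"

-- ===== PRECONDITION & SPEC =====
def Spec_extract_primary_color (gemini_color : String) (out : String) : Prop := out = extract_primary_color_alt gemini_color
instance (gemini_color : String) (out : String) : Decidable (Spec_extract_primary_color gemini_color out) := by unfold Spec_extract_primary_color; infer_instance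

-- ===== CLAIM (what is proved, stated in full; the proofs are below) =====
def Claim_equal_extract_primary_color : Prop := ∀ (gemini_color : String), Dom_extract_primary_color gemini_color → Spec_extract_primary_color gemini_color (extract_primary_color gemini_color)

-- ===== LEMMAS AND PROOFS =====

-- No color word is empty.
theorem pv_words_ne_nil : ∀ c ∈ pvColorWords, c.toList ≠ [] := by decide

-- No color word is a (proper or improper) prefix of a different color word.
theorem pv_words_prefix_free :
    ∀ c ∈ pvColorWords, ∀ d ∈ pvColorWords, c.toList ≠ d.toList → ¬ c.toList <+: d.toList := by
  decide

-- findSome? over range returns the value at the least index producing one.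
theorem pv_findSome?_range {β : Type} (f : Nat → Option β) (i n : Nat) (y : β)
    (hin : i < n) (hy : f i = some y) (hlt : ∀ j < i, f j = none) :
    (List.range n).findSome? f = some y := by
  induction n with
  | zero => omega
  | succ n ih =>
    rw [List.range_succ, List.findSome?_append]
    rcases Nat.lt_or_ge i n with h | h
    · rw [ih h]; rfl
    · have hi : i = n := by omega
      have : (List.range n).findSome? f = none :=
        List.findSome?_eq_none_iff.mpr (fun a ha => hlt a (by
          have := List.mem_range.mp ha; omega))
      rw [this]; subst hi; simp [hy]

-- findSome? of a unique producer.
theorem pv_findSome?_unique {α β : Type} (l : List α) (f : α → Option β) (c : α) (y : β)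
    (hc : c ∈ l) (hy : f c = some y) (hu : ∀ d ∈ l, d ≠ c → f d = none) :
    l.findSome? f = some y := by
  induction l with
  | nil => cases hc
  | cons a t ih =>
    rw [List.findSome?_cons]
    by_cases hac : a = c
    · subst hac; rw [hy]
    · rw [hu a (List.mem_cons_self) hac]
      exact ih ((List.mem_cons.mp hc).resolve_left (fun h => hac h.symm))
        (fun d hd => hu d (List.mem_cons_of_mem _ hd))

-- prefix of a suffix is an infix
theorem pv_prefix_drop_infix {α : Type} (d l : List α) (j : Nat) (h : d <+: l.drop j) :
    d <:+: l := by
  obtain ⟨u, hu⟩ := List.drop_suffix j l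
  obtain ⟨v, hv⟩ := h
  exact ⟨u, v, by rw [← hu, ← hv]; simp⟩

-- ===== VERDICT (by name: the statement is the Claim_ definition above) =====
theorem extract_primary_color_spec : Claim_equal_extract_primary_color := by
  intro g _
  unfold Spec_extract_primary_color
  by_cases hg : g = ""
  · subst hg; rfl
  · simp only [extract_primary_color, extract_primary_color_alt, if_neg hg]
    set gl := PySem.Str.lower g with hgl
    set L : List Char := gl.toList with hL
    set F : Nat → Option String := fun i =>
      pvColorWords.findSome? (fun color =>
        if PySem.Chars.startswith (L.drop i) color.toList then some color else none) with hF
    have hfound : pvColorWords.foldl (fun acc color =>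
        if PySem.Str.find gl color ≠ -1 then acc ++ [(PySem.Str.find gl color, color)] else acc)
        ([] : List (Int × String))
        = (pvColorWords.filter (fun c => decide (PySem.Str.find gl c ≠ -1))).map
            (fun c => (PySem.Str.find gl c, c)) := by
      rw [PySem.List.foldl_append_ite (p := fun color => PySem.Str.find gl color ≠ -1)
        (f := fun color => (PySem.Str.find gl color, color))]
      rw [List.nil_append]
    rw [hfound]
    set found := (pvColorWords.filter (fun c => decide (PySem.Str.find gl c ≠ -1))).map
        (fun c => (PySem.Str.find gl c, c)) with hfnd
    have hlen : (PySem.Str.len gl).toNat = L.length := by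
      rw [PySem.Str.len_eq]; simp [hL]
    rcases hs : PySem.List.sorted found (fun x => x.1) false with _ | ⟨⟨p, c⟩, t⟩
    · -- no color occurs
      have hf0 : found = [] := (PySem.List.sorted_eq_nil_iff found (fun x => x.1) false).mp hs
      have hall : ∀ d ∈ pvColorWords, PySem.Str.find gl d = -1 := by
        intro d hd
        by_contra hne
        have : (PySem.Str.find gl d, d) ∈ found := by
          rw [hfnd]
          exact List.mem_map_of_mem (List.mem_filter.mpr ⟨hd, by simpa using hne⟩)
        rw [hf0] at this
        cases this
      have hnone : (List.range (PySem.Str.len gl).toNat).findSome? F = none := by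
        apply List.findSome?_eq_none_iff.mpr
        intro i _
        apply List.findSome?_eq_none_iff.mpr
        intro d hd
        by_cases hstart : PySem.Chars.startswith (L.drop i) d.toList = true
        · exfalso
          have hinf : d.toList <:+: L :=
            pv_prefix_drop_infix _ _ _ ((PySem.Chars.startswith_iff _ _).mp hstart)
          have : PySem.Chars.find L d.toList ≠ -1 := (PySem.Chars.find_ne_neg_one_iff _ _).mpr hinf
          have hfd := hall d hd
          rw [PySem.Str.find_eq, ← hL] at hfd
          exact this hfd
        · simp [Bool.not_eq_true] at hstart
          simp [hstart]
      rw [hnone]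
    · -- head of the sorted found list: the earliest-occurring color
      have hmempc : (p, c) ∈ found := by
        have h1 : (p, c) ∈ PySem.List.sorted found (fun x => x.1) false := by
          rw [hs]; exact List.mem_cons_self
        exact (PySem.List.mem_sorted found (fun x => x.1) false (p, c)).mp h1
      have hc : c ∈ pvColorWords ∧ PySem.Str.find gl c = p := by
        rw [hfnd] at hmempc
        obtain ⟨a, ha, heq⟩ := List.mem_map.mp hmempc
        obtain ⟨ha1, _⟩ := List.mem_filter.mp ha
        obtain ⟨h1, h2⟩ := Prod.mk.injEq .. ▸ heq
        exact ⟨h2 ▸ ha1, h2 ▸ h1⟩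
      obtain ⟨hcw, hfind⟩ := hc
      have hpne : p ≠ -1 := by
        rw [hfnd] at hmempc
        obtain ⟨a, ha, heq⟩ := List.mem_map.mp hmempc
        obtain ⟨_, hdec⟩ := List.mem_filter.mp ha
        obtain ⟨h1, _⟩ := Prod.mk.injEq .. ▸ heq
        simp at hdec
        exact h1 ▸ hdec
      have hmin : ∀ y ∈ found, p ≤ y.1 :=
        PySem.List.key_head_sorted_le found (fun x => x.1) hs
      have hfindC : PySem.Chars.find L c.toList = p := by
        rw [← hfind, hL, PySem.Str.find_eq]
      have hp0 : 0 ≤ p := by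
        have := PySem.Chars.neg_one_le_find L c.toList
        rw [hfindC] at this
        omega
      have hspec := PySem.Chars.find_spec (s := L) (sub := c.toList) (hfindC ▸ hp0)
      rw [hfindC] at hspec
      obtain ⟨hpre, hfirst⟩ := hspec
      have hplen : p.toNat < L.length := by
        by_contra hge
        have : L.drop p.toNat = [] := List.drop_eq_nil_iff.mpr (by omega)
        rw [this] at hpre
        exact pv_words_ne_nil c hcw (List.prefix_nil.mp hpre)
      have hsome : (List.range (PySem.Str.len gl).toNat).findSome? F = some c := by
        apply pv_findSome?_range F p.toNat _ c (by omega) _ _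
        · -- at position p.toNat exactly the word c starts (prefix-freeness)
          rw [hF]
          apply pv_findSome?_unique _ _ c c hcw
          · simp [(PySem.Chars.startswith_iff (L.drop p.toNat) c.toList).mpr hpre]
          · intro d hd hdc
            have hdl : d.toList ≠ c.toList := fun h => hdc (String.toList_inj.mp h)
            by_cases hstart : PySem.Chars.startswith (L.drop p.toNat) d.toList = true
            · exfalso
              have hdp : d.toList <+: L.drop p.toNat := (PySem.Chars.startswith_iff _ _).mp hstart
              rcases List.prefix_or_prefix_of_prefix hdp hpre with h | h
              · exact pv_words_prefix_free d hd c hcw hdl h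
              · exact pv_words_prefix_free c hcw d hd (Ne.symm hdl) h
            · simp [Bool.not_eq_true] at hstart
              simp [hstart]
        · -- no color word starts before position p.toNat
          intro j hj
          rw [hF]
          apply List.findSome?_eq_none_iff.mpr
          intro d hd
          by_cases hstart : PySem.Chars.startswith (L.drop j) d.toList = true
          · exfalso
            have hdp : d.toList <+: L.drop j := (PySem.Chars.startswith_iff _ _).mp hstart
            have hinf : d.toList <:+: L := pv_prefix_drop_infix _ _ _ hdp
            have hq0 : 0 ≤ PySem.Chars.find L d.toList :=
              (PySem.Chars.find_nonneg_iff _ _).mpr hinf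
            have hqC : PySem.Str.find gl d = PySem.Chars.find L d.toList := by
              rw [hL, PySem.Str.find_eq]
            have hqmem : (PySem.Str.find gl d, d) ∈ found := by
              rw [hfnd]
              refine List.mem_map_of_mem (List.mem_filter.mpr ⟨hd, ?_⟩)
              simp only [ne_eq, decide_eq_true_eq]
              rw [hqC]
              omega
            have hpq : p ≤ PySem.Str.find gl d := hmin _ hqmem
            obtain ⟨_, hfirstd⟩ := PySem.Chars.find_spec (s := L) (sub := d.toList) hq0
            have hjq : (PySem.Chars.find L d.toList).toNat ≤ j := by
              by_contra hlt
              exact hfirstd j (by omega) hdp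
            rw [hqC] at hpq
            omega
          · simp [Bool.not_eq_true] at hstart
            simp [hstart]
      rw [hsome]
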